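-- pv_equiv track=rewrite | github.com/mmh132/ProjectEuler | solves/P223.py | fsieve
-- ===== SOURCE A (Python) =====
-- def fsieve(n):
--     l = []
--     rv = []
--     for i in range(n+1):rv.append(l.copy())
--     for i in range(1,len(rv)):
--         for k in range(i, len(rv), i):
--             rv[k].append(i)
--     for i in range(len(rv)):
--         newl = []
--         while len(rv[i]) > 1:
--             newl.append((rv[i].pop(0), rv[i].pop(-1)))
--         if len(rv[i]) == 1: newl.append((rv[i][0], rv[i][0]))
--         rv[i] = newl.copy()
--     return rv
-- ===== SOURCE B (Python) =====
-- def fsieve(n):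
--     rv = []
--     for i in range(n + 1):
--         pairs = []
--         d = 1
--         while d * d <= i:
--             if i % d == 0:
--                 pairs.append((d, i // d))
--             d += 1
--         rv.append(pairs)
--     return rv
-- ===== Notes on version B (the rewrite author's own statement) =====
-- stated objective: alternative
-- what changed: Replaces the global multiples sieve plus two-ended pop-pairing of each divisor list with per-number trial division up to the square root that emits each (d, i//d) pair directly.
import Mathlib
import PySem

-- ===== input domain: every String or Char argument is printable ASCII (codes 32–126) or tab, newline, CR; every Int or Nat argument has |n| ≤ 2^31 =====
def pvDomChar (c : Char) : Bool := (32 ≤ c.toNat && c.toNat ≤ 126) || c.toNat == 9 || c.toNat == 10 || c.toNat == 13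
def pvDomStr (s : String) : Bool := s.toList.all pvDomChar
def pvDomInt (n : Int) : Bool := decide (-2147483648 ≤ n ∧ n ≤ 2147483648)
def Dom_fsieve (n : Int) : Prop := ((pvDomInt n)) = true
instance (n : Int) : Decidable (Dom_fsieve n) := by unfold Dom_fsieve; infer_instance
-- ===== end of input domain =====

-- B replaces A's global multiples sieve + two-ended pop pairing of each divisor list by per-number
-- trial division up to the square root, emitting each (d, i//d) pair directly (alternative algorithm).

-- ===== PORT A =====
-- A's third loop body: while len(l) > 1: newl.append((l.pop(0), l.pop(-1))); if len(l) == 1: newl.append((l[0], l[0]))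
def fsievePair : List Int → List (Int × Int) → List (Int × Int)
  | [], newl => newl
  | [x], newl => newl ++ [(x, x)]
  | x :: y :: rest, newl =>
    fsievePair ((y :: rest).dropLast) (newl ++ [(x, (y :: rest).getLast (List.cons_ne_nil y rest))])
termination_by l _ => l.length
decreasing_by simp

def fsieve (n : Int) : List (List (Int × Int)) :=
  -- l = []  (never mutated, so l.copy() = []);  for i in range(n+1): rv.append(l.copy())
  let rv := (PySem.List.pyRange 0 (n + 1) 1).foldl (fun rv _ => rv ++ [([] : List Int)]) []
  -- for i in range(1, len(rv)):  for k in range(i, len(rv), i):  rv[k].append(i)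
  -- (the index k satisfies 1 ≤ i ≤ k < len(rv), so pySetD/pyGetD are exact here)
  let rv := (PySem.List.pyRange 1 (PySem.List.len rv) 1).foldl (fun rv i =>
    (PySem.List.pyRange i (PySem.List.len rv) i).foldl
      (fun rv k => PySem.List.pySetD rv k (PySem.List.pyGetD rv k [] ++ [i])) rv) rv
  -- for i in range(len(rv)): rv[i] = <pairing while-loop on rv[i]>   (rows replaced in ascending order)
  rv.foldl (fun out row => out ++ [fsievePair row []]) []

-- ===== PORT B =====
-- Source B's inner while loop: d = 1; while d*d <= i: if i % d == 0: pairs.append((d, i//d)); d += 1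
def fsieveTrial (i : Int) (d : Int) (pairs : List (Int × Int)) : List (Int × Int) :=
  if d * d ≤ i then
    fsieveTrial i (d + 1) (if PySem.Int.mod i d = 0 then pairs ++ [(d, PySem.Int.floordiv i d)] else pairs)
  else pairs
termination_by (i + 1 - d).toNat
decreasing_by
  have hd : d ≤ i := by by_cases h0 : d ≤ 0 <;> nlinarith
  omega

def fsieve_alt (n : Int) : List (List (Int × Int)) :=
  (PySem.List.pyRange 0 (n + 1) 1).foldl (fun rv i => rv ++ [fsieveTrial i 1 []]) []

-- ===== PRECONDITION & SPEC =====
def Spec_fsieve (n : Int) (out : List (List (Int × Int))) : Prop := out = fsieve_alt n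
instance (n : Int) (out : List (List (Int × Int))) : Decidable (Spec_fsieve n out) := by unfold Spec_fsieve; infer_instance

-- ===== CLAIM (what is proved, stated in full; the proofs are below) =====
def Claim_equal_fsieve : Prop := ∀ (n : Int), Dom_fsieve n → Spec_fsieve n (fsieve n)

-- ===== LEMMAS AND PROOFS =====

-- proof-side names for the divisor lists the two programs traverse
def divsUpTo (N k : Int) : List Int :=
  (PySem.List.pyRange 1 N 1).filter (fun i => decide (i ∣ k) && decide (i ≤ k))
def divsAll (k : Int) : List Int :=
  (PySem.List.pyRange 1 (k + 1) 1).filter (fun e => decide (e ∣ k))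
def divsLt (k : Int) : List Int :=
  (PySem.List.pyRange 1 (k + 1) 1).filter (fun e => decide (e ∣ k) && decide (e * e < k))
def divsEq (k : Int) : List Int :=
  (PySem.List.pyRange 1 (k + 1) 1).filter (fun e => decide (e ∣ k) && decide (e * e = k))
def divsLe (k : Int) : List Int :=
  (PySem.List.pyRange 1 (k + 1) 1).filter (fun e => decide (e ∣ k) && decide (e * e ≤ k))

-- two strictly increasing integer lists with the same members are equal
theorem pairwise_lt_ext (l₁ l₂ : List Int) (h₁ : List.Pairwise (· < ·) l₁)
    (h₂ : List.Pairwise (· < ·) l₂) (hm : ∀ x, x ∈ l₁ ↔ x ∈ l₂) : l₁ = l₂ :=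
  List.Perm.eq_of_pairwise
    (fun _ _ _ _ hab hba => absurd hba (lt_asymm hab)) h₁ h₂
    ((List.perm_ext_iff_of_nodup (h₁.imp ne_of_lt) (h₂.imp ne_of_lt)).2 hm)

theorem nodup_pyRange_pos (a b : Int) {s : Int} (hs : 0 < s) :
    (PySem.List.pyRange a b s).Nodup := by
  rw [PySem.List.pyRange_of_pos a b hs]
  refine List.Nodup.map ?_ (List.nodup_range)
  intro x y h
  have h2 : s * (x : Int) = s * (y : Int) := by linarith
  exact_mod_cast mul_left_cancel₀ (ne_of_gt hs) h2

theorem length_foldl_pySetD (i : Int) (ks : List Int) (rv : List (List Int)) :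
    (ks.foldl (fun rv k => PySem.List.pySetD rv k (PySem.List.pyGetD rv k [] ++ [i])) rv).length
      = rv.length := by
  induction ks generalizing rv with
  | nil => rfl
  | cons k ks ih => simp [List.foldl_cons, ih, PySem.List.length_pySetD]

-- the inner loop over the distinct multiples of i appends i exactly at those rows
theorem getElem?_foldl_pySetD (i : Int) (ks : List Int) (rv : List (List Int))
    (hnd : ks.Nodup) (hpos : ∀ k ∈ ks, 0 ≤ k) (j : Nat) (hj : j < rv.length) :
    (ks.foldl (fun rv k => PySem.List.pySetD rv k (PySem.List.pyGetD rv k [] ++ [i])) rv)[j]?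
      = (rv[j]?).map (fun l => if (j : Int) ∈ ks then l ++ [i] else l) := by
  induction ks generalizing rv with
  | nil => simp
  | cons k ks ih =>
    have hk0 : 0 ≤ k := hpos k (by simp)
    have hnotin : k ∉ ks := (List.nodup_cons.1 hnd).1
    rw [List.foldl_cons]
    rw [ih _ (List.nodup_cons.1 hnd).2 (fun x hx => hpos x (by simp [hx])) (by rwa [PySem.List.length_pySetD])]
    rw [PySem.List.pySetD_of_nonneg _ _ hk0]
    by_cases hjk : (j : Int) = k
    · have hjk' : k.toNat = j := by omega
      rw [hjk']
      rw [PySem.List.pyGetD_eq_getElem _ _ hk0 (by rw [← hjk]; exact_mod_cast hj)]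
      simp [hnotin, hjk, hjk', hj]
    · rw [List.getElem?_set_ne (by omega)]
      simp [List.mem_cons, hjk]

-- the sieve's double loop appends to row j exactly its divisors i (in ascending order)
theorem getElem?_sieve (is : List Int) (rv : List (List Int)) (his : ∀ i ∈ is, 1 ≤ i)
    (j : Nat) (hj : j < rv.length) :
    (is.foldl (fun rv i =>
        (PySem.List.pyRange i (PySem.List.len rv) i).foldl
          (fun rv k => PySem.List.pySetD rv k (PySem.List.pyGetD rv k [] ++ [i])) rv) rv)[j]?
      = (rv[j]?).map (fun l => l ++ is.filter (fun i => decide (i ∣ (j : Int)) && decide (i ≤ (j : Int)))) := by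
  induction is generalizing rv with
  | nil => simp
  | cons i is ih =>
    have hi1 : 1 ≤ i := his i (by simp)
    rw [List.foldl_cons]
    rw [ih _ (fun x hx => his x (by simp [hx])) (by rw [length_foldl_pySetD]; exact hj)]
    rw [getElem?_foldl_pySetD i _ rv (nodup_pyRange_pos _ _ hi1)
      (fun k hk => by
        have := (PySem.List.mem_pyRange_iff_of_pos hi1 k).1 hk
        omega) j hj]
    rw [Option.map_map]
    cases hrv : rv[j]? with
    | none => rfl
    | some l =>
      simp only [Option.map_some, Function.comp_apply]
      congr 1
      have hmem : ((j : Int) ∈ PySem.List.pyRange i (↑rv.length) i)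
          ↔ (i ∣ (j : Int) ∧ i ≤ (j : Int)) := by
        rw [PySem.List.mem_pyRange_iff_of_pos hi1]
        constructor
        · rintro ⟨h1, h2, h3⟩
          refine ⟨?_, h1⟩
          have := dvd_add h3 (dvd_refl i)
          simpa using this
        · rintro ⟨h1, h2⟩
          exact ⟨h2, by exact_mod_cast hj, dvd_sub h1 (dvd_refl i)⟩
      rw [List.filter_cons]
      by_cases hc : i ∣ (j : Int) ∧ i ≤ (j : Int)
      · simp [hmem.2 hc, hc.1, hc.2]
      · have hn : ¬ ((j:Int) ∈ PySem.List.pyRange i (↑rv.length) i) := fun h => hc (hmem.1 h)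
        have hb : (decide (i ∣ (j:Int)) && decide (i ≤ (j:Int))) = false := by
          rcases Decidable.not_and_iff_or_not.1 hc with h | h <;> simp [h]
        simp [hn, hb]

theorem length_sieve (is : List Int) (rv : List (List Int)) :
    (is.foldl (fun rv i =>
        (PySem.List.pyRange i (PySem.List.len rv) i).foldl
          (fun rv k => PySem.List.pySetD rv k (PySem.List.pyGetD rv k [] ++ [i])) rv) rv).length
      = rv.length := by
  induction is generalizing rv with
  | nil => rfl
  | cons i is ih => rw [List.foldl_cons, ih, length_foldl_pySetD]

theorem cofactor_facts {k d : Int} (hk : 1 ≤ k) (hd : 1 ≤ d) (hdvd : d ∣ k) :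
    1 ≤ k / d ∧ (k / d) ∣ k ∧ d * (k / d) = k := by
  obtain ⟨c, hc⟩ := hdvd
  have hdne : d ≠ 0 := by omega
  have hcd : k / d = c := by rw [hc]; exact Int.mul_ediv_cancel_left c hdne
  have hc1 : 1 ≤ c := by nlinarith
  exact ⟨by omega, hcd ▸ ⟨d, by linarith [hc]⟩, by rw [hcd]; linarith [hc]⟩

theorem mem_divsAll {k e : Int} (hk : 1 ≤ k) : e ∈ divsAll k ↔ 1 ≤ e ∧ e ∣ k := by
  unfold divsAll
  simp only [List.mem_filter, PySem.List.mem_pyRange_one, decide_eq_true_eq]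
  constructor
  · rintro ⟨⟨h1, h2⟩, h3⟩; exact ⟨h1, h3⟩
  · rintro ⟨h1, h2⟩; exact ⟨⟨h1, by have := Int.le_of_dvd (by omega) h2; omega⟩, h2⟩

theorem mem_divsLt {k e : Int} (hk : 1 ≤ k) : e ∈ divsLt k ↔ 1 ≤ e ∧ e ∣ k ∧ e * e < k := by
  unfold divsLt
  simp only [List.mem_filter, PySem.List.mem_pyRange_one, decide_eq_true_eq, Bool.and_eq_true]
  constructor
  · rintro ⟨⟨h1, h2⟩, h3, h4⟩; exact ⟨h1, h3, h4⟩
  · rintro ⟨h1, h2, h4⟩; exact ⟨⟨h1, by have := Int.le_of_dvd (by omega) h2; omega⟩, h2, h4⟩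

theorem mem_divsEq {k e : Int} (hk : 1 ≤ k) : e ∈ divsEq k ↔ 1 ≤ e ∧ e ∣ k ∧ e * e = k := by
  unfold divsEq
  simp only [List.mem_filter, PySem.List.mem_pyRange_one, decide_eq_true_eq, Bool.and_eq_true]
  constructor
  · rintro ⟨⟨h1, h2⟩, h3, h4⟩; exact ⟨h1, h3, h4⟩
  · rintro ⟨h1, h2, h4⟩; exact ⟨⟨h1, by have := Int.le_of_dvd (by omega) h2; omega⟩, h2, h4⟩

theorem mem_divsLe {k e : Int} (hk : 1 ≤ k) : e ∈ divsLe k ↔ 1 ≤ e ∧ e ∣ k ∧ e * e ≤ k := by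
  unfold divsLe
  simp only [List.mem_filter, PySem.List.mem_pyRange_one, decide_eq_true_eq, Bool.and_eq_true]
  constructor
  · rintro ⟨⟨h1, h2⟩, h3, h4⟩; exact ⟨h1, h3, h4⟩
  · rintro ⟨h1, h2, h4⟩; exact ⟨⟨h1, by have := Int.le_of_dvd (by omega) h2; omega⟩, h2, h4⟩

theorem pairwise_divsLt (k : Int) : (divsLt k).Pairwise (· < ·) :=
  (PySem.List.pairwise_lt_pyRange_one 1 (k+1)).filter _
theorem pairwise_divsEq (k : Int) : (divsEq k).Pairwise (· < ·) :=
  (PySem.List.pairwise_lt_pyRange_one 1 (k+1)).filter _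
theorem pairwise_divsLe (k : Int) : (divsLe k).Pairwise (· < ·) :=
  (PySem.List.pairwise_lt_pyRange_one 1 (k+1)).filter _
theorem pairwise_divsAll (k : Int) : (divsAll k).Pairwise (· < ·) :=
  (PySem.List.pairwise_lt_pyRange_one 1 (k+1)).filter _

theorem divsLe_eq_append {k : Int} (hk : 1 ≤ k) : divsLe k = divsLt k ++ divsEq k := by
  apply pairwise_lt_ext _ _ (pairwise_divsLe k)
  · rw [List.pairwise_append]
    refine ⟨pairwise_divsLt k, pairwise_divsEq k, ?_⟩
    intro a ha b hb
    obtain ⟨ha1, _, ha3⟩ := (mem_divsLt hk).1 ha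
    obtain ⟨hb1, _, hb3⟩ := (mem_divsEq hk).1 hb
    nlinarith
  · intro x
    rw [List.mem_append, mem_divsLe hk, mem_divsLt hk, mem_divsEq hk]
    constructor
    · rintro ⟨h1, h2, h3⟩
      rcases lt_or_eq_of_le h3 with h | h
      · exact Or.inl ⟨h1, h2, h⟩
      · exact Or.inr ⟨h1, h2, h⟩
    · rintro (⟨h1, h2, h3⟩ | ⟨h1, h2, h3⟩) <;> exact ⟨h1, h2, by omega⟩

-- there is at most one positive e with e * e = k, and it is its own cofactor
theorem divsEq_cases {k : Int} (hk : 1 ≤ k) :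
    divsEq k = [] ∨ ∃ x, divsEq k = [x] ∧ k / x = x := by
  have hmm : ∀ x ∈ divsEq k, ∀ y ∈ divsEq k, x = y := by
    intro x hx y hy
    obtain ⟨hx1, _, hx3⟩ := (mem_divsEq hk).1 hx
    obtain ⟨hy1, _, hy3⟩ := (mem_divsEq hk).1 hy
    nlinarith
  match hE : divsEq k with
  | [] => exact Or.inl rfl
  | [x] =>
    refine Or.inr ⟨x, rfl, ?_⟩
    obtain ⟨hx1, _, hx3⟩ := (mem_divsEq hk).1 (hE ▸ List.mem_singleton_self x)
    rw [← hx3]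
    exact Int.mul_ediv_cancel_left x (by omega)
  | x :: y :: rest =>
    exfalso
    have hp := hE ▸ pairwise_divsEq k
    have : x = y := hmm x (by simp [hE]) y (by simp [hE])
    rcases List.pairwise_cons.1 hp with ⟨h1, _⟩
    exact absurd (h1 y (by simp)) (by omega)

-- the ascending divisor list of k is: small divisors, then the cofactors of the
-- strictly-small ones in descending construction order (d ↦ k/d is a decreasing involution)
theorem divsAll_eq {k : Int} (hk : 1 ≤ k) :
    divsAll k = divsLe k ++ ((divsLt k).map (fun d => k / d)).reverse := by
  apply pairwise_lt_ext _ _ (pairwise_divsAll k)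
  · rw [List.pairwise_append]
    refine ⟨pairwise_divsLe k, ?_, ?_⟩
    · rw [List.pairwise_reverse, List.pairwise_map]
      refine (List.Pairwise.and_mem.mp (pairwise_divsLt k)).imp ?_
      rintro a b ⟨ha, hb, hab⟩
      obtain ⟨ha1, hadvd, ha3⟩ := (mem_divsLt hk).1 ha
      obtain ⟨hb1, hbdvd, hb3⟩ := (mem_divsLt hk).1 hb
      obtain ⟨hca1, _, hca3⟩ := cofactor_facts hk ha1 hadvd
      obtain ⟨hcb1, _, hcb3⟩ := cofactor_facts hk hb1 hbdvd
      show k / b < k / a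
      nlinarith
    · intro a ha b hb
      rw [List.mem_reverse, List.mem_map] at hb
      obtain ⟨d, hd, rfl⟩ := hb
      obtain ⟨ha1, hadvd, ha3⟩ := (mem_divsLe hk).1 ha
      obtain ⟨hd1, hddvd, hd3⟩ := (mem_divsLt hk).1 hd
      obtain ⟨hcd1, _, hcd3⟩ := cofactor_facts hk hd1 hddvd
      -- d * (k/d) = k, d*d < k ⇒ d < k/d ⇒ k < (k/d)^2; a*a ≤ k < (k/d)^2 ⇒ a < k/d
      by_contra hle
      push Not at hle
      have hdlt : d < k / d := by nlinarith
      have hklt : k < (k / d) * (k / d) := by nlinarith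
      have : (k / d) * (k / d) ≤ a * a := mul_le_mul hle hle (by omega) (by omega)
      linarith
  · intro e
    rw [List.mem_append, List.mem_reverse, List.mem_map, mem_divsAll hk, mem_divsLe hk]
    constructor
    · rintro ⟨he1, hedvd⟩
      by_cases hsq : e * e ≤ k
      · exact Or.inl ⟨he1, hedvd, hsq⟩
      · push Not at hsq
        obtain ⟨hc1, hcdvd, hc3⟩ := cofactor_facts hk he1 hedvd
        refine Or.inr ⟨k / e, (mem_divsLt hk).2 ⟨hc1, hcdvd, by nlinarith⟩, ?_⟩
        have : (k / e) * e = k := by linarith [hc3]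
        calc k / (k / e) = ((k/e) * e) / (k/e) := by rw [this]
          _ = e := Int.mul_ediv_cancel_left e (by omega)
    · rintro (⟨h1, h2, _⟩ | ⟨d, hd, rfl⟩)
      · exact ⟨h1, h2⟩
      · obtain ⟨hd1, hddvd, _⟩ := (mem_divsLt hk).1 hd
        obtain ⟨hc1, hcdvd, _⟩ := cofactor_facts hk hd1 hddvd
        exact ⟨hc1, hcdvd⟩

theorem fsievePair_acc (l : List Int) (acc : List (Int × Int)) :
    fsievePair l acc = acc ++ fsievePair l [] := by
  match l with
  | [] => simp [fsievePair]
  | [x] => simp [fsievePair]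
  | x :: y :: rest =>
    rw [fsievePair, fsievePair,
      fsievePair_acc ((y :: rest).dropLast) (acc ++ [(x, (y :: rest).getLast (List.cons_ne_nil y rest))]),
      fsievePair_acc ((y :: rest).dropLast) ([] ++ [(x, (y :: rest).getLast (List.cons_ne_nil y rest))])]
    simp
termination_by l.length
decreasing_by all_goals simp

theorem fsievePair_cons_concat (x z : Int) (M : List Int) (acc : List (Int × Int)) :
    fsievePair (x :: (M ++ [z])) acc = fsievePair M (acc ++ [(x, z)]) := by
  match M with
  | [] => simp [fsievePair]
  | y :: M' =>
    show fsievePair (x :: (y :: (M' ++ [z]))) acc = _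
    rw [fsievePair]
    simp only [show y :: (M' ++ [z]) = (y :: M') ++ [z] from rfl,
      List.getLast_concat, List.dropLast_concat]

-- the front/back pairing of s ++ t ++ reverse (map f s)  (t a fixed point of f, or empty)
theorem fsievePair_sym (f : Int → Int) (s t : List Int)
    (ht : t = [] ∨ ∃ x, t = [x] ∧ f x = x) :
    fsievePair (s ++ t ++ (s.map f).reverse) [] = (s ++ t).map (fun d => (d, f d)) := by
  induction s with
  | nil =>
    rcases ht with rfl | ⟨x, rfl, hfx⟩
    · simp [fsievePair]
    · simp [fsievePair, hfx]
  | cons a s ih =>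
    have hsh : (a :: s) ++ t ++ ((a :: s).map f).reverse
        = a :: ((s ++ t ++ (s.map f).reverse) ++ [f a]) := by simp
    rw [hsh, fsievePair_cons_concat, fsievePair_acc, ih]
    simp

theorem fsieveTrial_char (k : Int) (d : Int) (acc : List (Int × Int)) (hd : 1 ≤ d) :
    fsieveTrial k d acc = acc ++
      ((PySem.List.pyRange d (k + 1) 1).filter
          (fun e => decide (e ∣ k) && decide (e * e ≤ k))).map
        (fun e => (e, PySem.Int.floordiv k e)) := by
  rw [fsieveTrial]
  by_cases h : d * d ≤ k
  · have hdk : d ≤ k := by nlinarith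
    rw [if_pos h, PySem.List.pyRange_one_cons (by omega), List.filter_cons]
    rw [fsieveTrial_char k (d + 1) _ (by omega)]
    by_cases hdvd : d ∣ k
    · rw [if_pos ((PySem.Int.mod_eq_zero_iff_dvd _ _).2 hdvd)]
      simp [hdvd, h]
    · rw [if_neg (fun hc => hdvd ((PySem.Int.mod_eq_zero_iff_dvd _ _).1 hc))]
      simp [hdvd]
  · rw [if_neg h]
    have hfil : (PySem.List.pyRange d (k + 1) 1).filter
        (fun e => decide (e ∣ k) && decide (e * e ≤ k)) = [] := by
      apply List.filter_eq_nil_iff.2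
      intro e he
      have hde : d ≤ e ∧ e < k + 1 := PySem.List.mem_pyRange_one.1 he
      have : ¬ (e * e ≤ k) := by nlinarith
      simp [this]
    simp [hfil]
termination_by (k + 1 - d).toNat
decreasing_by
  have : d ≤ k := by nlinarith
  omega

theorem divsUpTo_eq_divsAll {N k : Int} (hk : 1 ≤ k) (hkN : k < N) :
    divsUpTo N k = divsAll k := by
  unfold divsUpTo divsAll
  rw [PySem.List.pyRange_one_append 1 (k + 1) N (by omega) (by omega), List.filter_append]
  have h2 : (PySem.List.pyRange (k + 1) N).filter (fun i => decide (i ∣ k) && decide (i ≤ k)) = [] := by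
    apply List.filter_eq_nil_iff.2
    intro e he
    have := PySem.List.mem_pyRange_one.1 he
    simp [show ¬ (e ≤ k) by omega]
  have h1 : (PySem.List.pyRange 1 (k + 1)).filter (fun i => decide (i ∣ k) && decide (i ≤ k))
      = (PySem.List.pyRange 1 (k + 1)).filter (fun e => decide (e ∣ k)) := by
    apply List.filter_congr
    intro x hx
    have := PySem.List.mem_pyRange_one.1 hx
    simp [show x ≤ k by omega]
  rw [h1, h2, List.append_nil]

-- per number: A's pop-pairing of the ascending divisor list = B's trial division
theorem core_eq (N k : Int) (hk : 0 ≤ k) (hkN : k < N) :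
    fsievePair (divsUpTo N k) [] = fsieveTrial k 1 [] := by
  rcases eq_or_lt_of_le hk with rfl | hk1
  · have hA : divsUpTo N 0 = [] := by
      apply List.filter_eq_nil_iff.2
      intro e he
      have := PySem.List.mem_pyRange_one.1 he
      simp [show ¬ (e ≤ (0:Int)) by omega]
    rw [hA, fsieveTrial]
    norm_num [fsievePair]
  · have hk' : 1 ≤ k := hk1
    rw [divsUpTo_eq_divsAll hk' hkN, divsAll_eq hk', divsLe_eq_append hk',
      fsievePair_sym (fun d => k / d) (divsLt k) (divsEq k) (divsEq_cases hk'),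
      ← divsLe_eq_append hk']
    rw [fsieveTrial_char k 1 [] le_rfl]
    show (divsLe k).map _ = [] ++ (divsLe k).map _
    rw [List.nil_append]
    apply List.map_congr_left
    intro e he
    have he1 : 1 ≤ e := ((mem_divsLe hk').1 he).1
    rw [PySem.Int.floordiv_eq_ediv_of_pos (by omega)]

theorem fsieve_eq_alt (n : Int) : fsieve n = fsieve_alt n := by
  unfold fsieve fsieve_alt
  simp only
  set m : Nat := (n + 1 - 0).toNat with hm
  have hrv0 : (PySem.List.pyRange 0 (n + 1) 1).foldl (fun rv _ => rv ++ [([] : List Int)]) []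
      = List.replicate m [] := by
    rw [PySem.List.foldl_append_singleton_eq_map (fun _ => ([] : List Int))]
    rw [List.nil_append, List.map_const', PySem.List.length_pyRange_one]
  rw [hrv0]
  have hlen0 : (List.replicate m ([] : List Int)).length = m := List.length_replicate
  set rv1 := (PySem.List.pyRange 1 (PySem.List.len (List.replicate m ([] : List Int))) 1).foldl
      (fun rv i => (PySem.List.pyRange i (PySem.List.len rv) i).foldl
        (fun rv k => PySem.List.pySetD rv k (PySem.List.pyGetD rv k [] ++ [i])) rv)
      (List.replicate m ([] : List Int)) with hrv1
  have hlen1 : rv1.length = m := by rw [hrv1, length_sieve, hlen0]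
  have hget1 : ∀ j : Nat, j < m → rv1[j]? = some (divsUpTo (m : Int) (j : Int)) := by
    intro j hj
    rw [hrv1, getElem?_sieve _ _ (fun i hi => (PySem.List.mem_pyRange_one.1 hi).1) j (by omega)]
    rw [List.getElem?_replicate, if_pos hj]
    simp only [Option.map_some, List.nil_append]
    congr 1
    unfold divsUpTo
    congr 1
    simp [hlen0]
  rw [PySem.List.foldl_append_singleton_eq_map (fun row => fsievePair row []),
    PySem.List.foldl_append_singleton_eq_map (fun i => fsieveTrial i 1 []),
    List.nil_append, List.nil_append]
  apply List.ext_getElem?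
  intro j
  by_cases hj : j < m
  · rw [List.getElem?_map, hget1 j hj]
    rw [PySem.List.pyRange_one, List.map_map, List.getElem?_map,
      List.getElem?_range (by omega)]
    simp only [Option.map_some, Function.comp_apply]
    congr 1
    rw [core_eq (m : Int) (j : Int) (by omega) (by exact_mod_cast hj)]
    congr 1
    omega
  · rw [List.getElem?_eq_none (by simp [hlen1]; omega),
      List.getElem?_eq_none (by simp [PySem.List.length_pyRange_one]; omega)]

-- ===== VERDICT (by name: the statement is the Claim_ definition above) =====
theorem fsieve_spec : Claim_equal_fsieve := by
  intro n _
  unfold Spec_fsieve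
  exact fsieve_eq_alt n
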